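-- pv_equiv track=rewrite | github.com/alexresiga/courses | first semester/fp/assignment1/SetBP10.py | productOfProperFactors
-- ===== SOURCE A (Python) =====
-- def productOfProperFactors(n):
--     """
--         This function returns the product of all proper factor of a given natural number n.
--         input: n natural number.
--         output: a string with the proper factors and the reuslt of their product.
--     """
--     result=""
--     p=1
--     d=2
--     while d<=n//2:
--         if n%d==0:
--             p*=d
--             result+=str(d)+'*'
--         d+=1
--     result=result[:-1]
--     result+='='+ str(p)
--     return result
-- ===== SOURCE B (Python) =====
-- def productOfProperFactors(n):
--     """
--         This function returns the product of all proper factor of a given natural number n.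
--         input: n natural number.
--         output: a string with the proper factors and the reuslt of their product.
--     """
--     facs = []
--     d = 2
--     while d * d <= n:
--         if n % d == 0:
--             facs.append(d)
--             if d != n // d:
--                 facs.append(n // d)
--         d += 1
--     facs.sort()
--     p = 1
--     for f in facs:
--         p *= f
--     return '*'.join(str(f) for f in facs) + '=' + str(p)
-- ===== Notes on version B (the rewrite author's own statement) =====
-- stated objective: faster
-- what changed: B enumerates divisor pairs (d, n//d) only up to sqrt(n) and sorts them, instead of A's linear scan of every candidate up to n//2.
import Mathlib
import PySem

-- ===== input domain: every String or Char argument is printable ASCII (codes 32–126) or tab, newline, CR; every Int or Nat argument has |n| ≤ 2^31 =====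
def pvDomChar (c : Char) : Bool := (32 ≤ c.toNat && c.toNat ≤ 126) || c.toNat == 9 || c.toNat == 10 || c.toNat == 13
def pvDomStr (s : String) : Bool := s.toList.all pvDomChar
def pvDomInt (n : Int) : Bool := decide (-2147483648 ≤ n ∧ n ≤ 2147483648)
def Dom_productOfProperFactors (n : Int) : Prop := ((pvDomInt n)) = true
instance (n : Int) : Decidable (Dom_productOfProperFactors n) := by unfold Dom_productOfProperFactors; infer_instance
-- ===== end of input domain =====

-- B enumerates divisor pairs (d, n//d) up to sqrt(n) and sorts, instead of A's linear scan up to n//2 (faster).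

-- ===== PORT A =====
-- while d <= n//2 ported as a fold over range(2, n//2 + 1); state = (result, p)
def productOfProperFactors (n : Int) : String :=
  let st := (PySem.List.pyRange 2 (PySem.Int.floordiv n 2 + 1) 1).foldl
    (fun (st : String × Int) d =>
      if PySem.Int.mod n d = 0 then (st.1 ++ PySem.Int.toStr d ++ "*", st.2 * d)
      else st) ("", 1)
  PySem.Str.slice st.1 none (some (-1)) ++ "=" ++ PySem.Int.toStr st.2

-- ===== PORT B =====
-- the 'while d*d <= n' collection loop of Source B
def pvBFacs (n : Int) (d : Int) (acc : List Int) : List Int :=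
  if d * d ≤ n then
    pvBFacs n (d + 1)
      (if PySem.Int.mod n d = 0 then
        (if d ≠ PySem.Int.floordiv n d then (acc ++ [d]) ++ [PySem.Int.floordiv n d]
         else acc ++ [d])
       else acc)
  else acc
termination_by (n + 1 - d).toNat
decreasing_by
  have hd : d ≤ n := by nlinarith [mul_self_nonneg (d - 1), mul_self_nonneg d]
  omega

def productOfProperFactors_alt (n : Int) : String :=
  let facs := PySem.List.sorted (pvBFacs n 2 []) (fun x => x) false
  let p := facs.foldl (fun a f => a * f) 1
  PySem.Str.join "*" (facs.map PySem.Int.toStr) ++ "=" ++ PySem.Int.toStr p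

-- ===== PRECONDITION & SPEC =====
def Spec_productOfProperFactors (n : Int) (out : String) : Prop := out = productOfProperFactors_alt n
instance (n : Int) (out : String) : Decidable (Spec_productOfProperFactors n out) := by unfold Spec_productOfProperFactors; infer_instance

-- ===== CLAIM (what is proved, stated in full; the proofs are below) =====
def Claim_equal_productOfProperFactors : Prop := ∀ (n : Int), Dom_productOfProperFactors n → Spec_productOfProperFactors n (productOfProperFactors n)

-- ===== LEMMAS AND PROOFS =====

-- chars of "d1*d2*…*dk*" : each block followed by a star
def pvStars (L : List (List Char)) : List Char := (L.map (fun c => c ++ ['*'])).flatten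

-- the divisor list A's loop filters out
def pvFiltA (n : Int) : List Int :=
  (PySem.List.pyRange 2 (PySem.Int.floordiv n 2 + 1) 1).filter
    (fun d => decide (PySem.Int.mod n d = 0))

lemma pvStars_cons (c : List Char) (L : List (List Char)) :
    pvStars (c :: L) = (c ++ ['*']) ++ pvStars L := by
  simp [pvStars]

lemma pvFoldA (n : Int) (l : List Int) (s : String) (p : Int) :
    (l.foldl (fun (st : String × Int) d =>
        if PySem.Int.mod n d = 0 then (st.1 ++ PySem.Int.toStr d ++ "*", st.2 * d) else st)
      (s, p))
    = (String.ofList (s.toList ++ pvStars ((l.filter (fun d => decide (PySem.Int.mod n d = 0))).map PySem.Int.toChars)),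
       p * (l.filter (fun d => decide (PySem.Int.mod n d = 0))).prod) := by
  induction l generalizing s p with
  | nil => simp [pvStars]
  | cons d l ih =>
    simp only [List.foldl_cons]
    by_cases h : PySem.Int.mod n d = 0
    · rw [if_pos h, ih]
      simp [h, pvStars_cons, String.toList_append, PySem.Int.toList_toStr, mul_assoc]
    · rw [if_neg h, ih]
      simp [h]

lemma pvDropLastStars (L : List (List Char)) (hne : ∀ c ∈ L, c ≠ []) :
    (pvStars L).dropLast = PySem.Chars.join ['*'] L := by
  induction L with
  | nil => simp [pvStars, PySem.Chars.join, List.intercalate]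
  | cons x L ih =>
    cases L with
    | nil => simp [pvStars, PySem.Chars.join_singleton]
    | cons y R =>
      have h2 : pvStars (y :: R) ≠ [] := by
        rw [pvStars_cons]
        intro hc
        rcases List.append_eq_nil_iff.mp hc with ⟨h3, _⟩
        rcases List.append_eq_nil_iff.mp h3 with ⟨_, h4⟩
        simp at h4
      rw [pvStars_cons, List.dropLast_append_of_ne_nil h2,
        ih (fun c hc => hne c (List.mem_cons_of_mem _ hc)), PySem.Chars.join_cons_cons,
        List.append_assoc]

lemma pvToCharsNeNil (n : Int) : PySem.Int.toChars n ≠ [] := by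
  unfold PySem.Int.toChars
  split
  · simp
  · intro h
    have h2 : 0 < (Nat.toDigits 10 n.toNat).length := Nat.length_toDigits_pos
    rw [h] at h2
    simp at h2

lemma pvBFacs_acc (n d : Int) (acc : List Int) : pvBFacs n d acc = acc ++ pvBFacs n d [] := by
  conv_lhs => rw [pvBFacs]
  conv_rhs => rw [pvBFacs]
  by_cases h : d * d ≤ n
  · rw [if_pos h, if_pos h, pvBFacs_acc n (d + 1)
      (if PySem.Int.mod n d = 0 then
        (if d ≠ PySem.Int.floordiv n d then (acc ++ [d]) ++ [PySem.Int.floordiv n d]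
         else acc ++ [d]) else acc),
      pvBFacs_acc n (d + 1)
      (if PySem.Int.mod n d = 0 then
        (if d ≠ PySem.Int.floordiv n d then (([] : List Int) ++ [d]) ++ [PySem.Int.floordiv n d]
         else ([] : List Int) ++ [d]) else ([] : List Int))]
    by_cases hm : PySem.Int.mod n d = 0
    · by_cases hne : d ≠ PySem.Int.floordiv n d <;> simp [hm, hne]
    · simp [hm]
  · rw [if_neg h, if_neg h]; simp
termination_by (n + 1 - d).toNat
decreasing_by
  all_goals
    have hdn : d ≤ n := by nlinarith [mul_self_nonneg (d - 1), mul_self_nonneg d]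
    omega

lemma pvBFacs_mem (n : Int) (d : Int) (hd : 2 ≤ d) (x : Int) :
    x ∈ pvBFacs n d [] ↔
      x ∣ n ∧ ((d ≤ x ∧ x * x ≤ n) ∨ (1 ≤ x ∧ n < x * x ∧ d * x ≤ n)) := by
  have hd0 : 0 < d := by omega
  have hfd : PySem.Int.floordiv n d = n / d := PySem.Int.floordiv_eq_ediv_of_pos hd0
  conv_lhs => rw [pvBFacs]
  by_cases h : d * d ≤ n
  · rw [if_pos h, pvBFacs_acc, List.mem_append, pvBFacs_mem n (d + 1) (by omega) x, hfd]
    constructor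
    · rintro (hnew | ⟨hdvd, hsmall | hlarge⟩)
      · -- x is one of the freshly appended elements
        by_cases hm : PySem.Int.mod n d = 0
        · have hdn : d ∣ n := (PySem.Int.mod_eq_zero_iff_dvd n d).mp hm
          have hcan : n / d * d = n := Int.ediv_mul_cancel hdn
          rw [if_pos hm] at hnew
          by_cases hne : d = n / d
          · rw [if_neg (by simpa using hne)] at hnew
            simp only [List.nil_append, List.mem_singleton] at hnew
            exact ⟨hnew ▸ hdn, Or.inl ⟨le_of_eq hnew.symm, hnew ▸ h⟩⟩
          · rw [if_pos hne] at hnew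
            simp only [List.nil_append, List.mem_append, List.mem_cons,
              List.not_mem_nil, or_false] at hnew
            rcases hnew with hx | hx
            · exact ⟨hx ▸ hdn, Or.inl ⟨le_of_eq hx.symm, hx ▸ h⟩⟩
            · -- x = n / d, the large cofactor
              subst hx
              have hdm : d ≤ n / d := by
                have hh : d * d ≤ n / d * d := by rw [hcan]; exact h
                exact le_of_mul_le_mul_right hh hd0
              have hdm' : d < n / d := lt_of_le_of_ne hdm hne
              have hm0 : 0 < n / d := by omega
              refine ⟨⟨d, hcan.symm⟩, Or.inr ⟨by omega, ?_, by rw [mul_comm, hcan]⟩⟩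
              calc n = n / d * d := hcan.symm
                _ < n / d * (n / d) := mul_lt_mul_of_pos_left hdm' hm0
        · rw [if_neg hm] at hnew
          simp at hnew
      · exact ⟨hdvd, Or.inl ⟨by omega, hsmall.2⟩⟩
      · refine ⟨hdvd, Or.inr ⟨hlarge.1, hlarge.2.1, ?_⟩⟩
        have hmm := mul_le_mul_of_nonneg_right (show d ≤ d + 1 by omega)
          (show (0:Int) ≤ x by omega)
        have := hlarge.2.2
        omega
    · rintro ⟨hdvd, hsmall | hlarge⟩
      · rcases eq_or_lt_of_le hsmall.1 with hx | hx
        · -- x = d : the fresh small element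
          left
          have hm : PySem.Int.mod n d = 0 := (PySem.Int.mod_eq_zero_iff_dvd n d).mpr (hx ▸ hdvd)
          rw [if_pos hm]
          by_cases hne : d = n / d
          · rw [if_neg (by simpa using hne)]; simp [← hx]
          · rw [if_pos hne]; simp [← hx]
        · right; exact ⟨hdvd, Or.inl ⟨by omega, hsmall.2⟩⟩
      · obtain ⟨hx1, hnx, hdx⟩ := hlarge
        obtain ⟨k, hk⟩ := hdvd
        rcases eq_or_lt_of_le hdx with hEq | hLt
        · -- d * x = n : x is the fresh cofactor n / d
          left
          have hdn : d ∣ n := ⟨x, hEq.symm⟩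
          have hm : PySem.Int.mod n d = 0 := (PySem.Int.mod_eq_zero_iff_dvd n d).mpr hdn
          have hq : n / d = x := by rw [← hEq]; exact Int.mul_ediv_cancel_left x (by omega)
          have hne : d ≠ n / d := by
            rw [hq]; rintro rfl; omega
          rw [if_pos hm, if_pos hne, hq]
          simp
        · -- d * x < n : still a cofactor for a later divisor
          right
          refine ⟨⟨k, hk⟩, Or.inr ⟨hx1, hnx, ?_⟩⟩
          have hdk : d < k := by
            have hlt : d * x < x * k := by omega
            have hx0 : (0:Int) < x := by omega
            nlinarith
          calc (d + 1) * x ≤ k * x := mul_le_mul_of_nonneg_right (by omega) (by omega)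
            _ = n := by rw [hk, mul_comm]
  · rw [if_neg h]
    simp only [List.not_mem_nil, false_iff]
    rintro ⟨hdvd, ⟨hdx, hxx⟩ | ⟨hx1, hnx, hdx⟩⟩
    · nlinarith
    · nlinarith
termination_by (n + 1 - d).toNat
decreasing_by
  all_goals
    have hdn : d ≤ n := by nlinarith [mul_self_nonneg (d - 1), mul_self_nonneg d]
    omega

lemma pvBFacs_nodup (n : Int) (d : Int) (hd : 2 ≤ d) : (pvBFacs n d []).Nodup := by
  have hd0 : 0 < d := by omega
  have hfd : PySem.Int.floordiv n d = n / d := PySem.Int.floordiv_eq_ediv_of_pos hd0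
  rw [pvBFacs]
  by_cases h : d * d ≤ n
  · rw [if_pos h, pvBFacs_acc, hfd]
    have hrest := pvBFacs_nodup n (d + 1) (by omega)
    have hnotd : d ∉ pvBFacs n (d + 1) [] := by
      intro hx
      rw [pvBFacs_mem n (d + 1) (by omega) d] at hx
      rcases hx with ⟨_, ⟨hdx, _⟩ | ⟨_, hnx, hdx⟩⟩
      · omega
      · nlinarith
    by_cases hm : PySem.Int.mod n d = 0
    · have hdn : d ∣ n := (PySem.Int.mod_eq_zero_iff_dvd n d).mp hm
      have hcan : n / d * d = n := Int.ediv_mul_cancel hdn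
      have hdm : d ≤ n / d := by
        have hh : d * d ≤ n / d * d := by rw [hcan]; exact h
        exact le_of_mul_le_mul_right hh hd0
      rw [if_pos hm]
      by_cases hne : d = n / d
      · rw [if_neg (by simpa using hne)]
        refine List.Nodup.append (by simp) hrest ?_
        intro a ha hb
        simp only [List.nil_append, List.mem_singleton] at ha
        exact hnotd (ha ▸ hb)
      · rw [if_pos hne]
        have hdm' : d < n / d := lt_of_le_of_ne hdm hne
        have hnotm : n / d ∉ pvBFacs n (d + 1) [] := by
          intro hx
          rw [pvBFacs_mem n (d + 1) (by omega) (n / d)] at hx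
          rcases hx with ⟨_, ⟨hdx, hxx⟩ | ⟨hx1, hnx, hdx⟩⟩
          · nlinarith
          · nlinarith
        refine List.Nodup.append (by simp [hne]) hrest ?_
        intro a ha hb
        simp only [List.nil_append, List.mem_append, List.mem_cons, List.not_mem_nil,
          List.not_mem_nil, or_false] at ha
        rcases ha with rfl | rfl
        · exact hnotd hb
        · exact hnotm hb
    · rw [if_neg hm]
      simpa using hrest
  · rw [if_neg h]; simp
termination_by (n + 1 - d).toNat
decreasing_by
  all_goals
    have hdn : d ≤ n := by nlinarith [mul_self_nonneg (d - 1), mul_self_nonneg d]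
    omega

lemma pvFiltA_mem (n : Int) (x : Int) :
    x ∈ pvFiltA n ↔ x ∣ n ∧ 2 ≤ x ∧ 2 * x ≤ n := by
  have h2 : PySem.Int.floordiv n 2 = n / 2 := PySem.Int.floordiv_eq_ediv_of_pos (by norm_num)
  simp only [pvFiltA, List.mem_filter, PySem.List.mem_pyRange_one, decide_eq_true_eq,
    PySem.Int.mod_eq_zero_iff_dvd, h2]
  constructor
  · rintro ⟨⟨h1, h3⟩, h4⟩; exact ⟨h4, h1, by omega⟩
  · rintro ⟨h4, h1, h3⟩; exact ⟨⟨h1, by omega⟩, h4⟩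

lemma pvFiltA_pairwise (n : Int) : (pvFiltA n).Pairwise (· < ·) :=
  (PySem.List.pairwise_lt_pyRange_one _ _).filter _

lemma pvKeyList (n : Int) :
    PySem.List.sorted (pvBFacs n 2 []) (fun x => x) false = pvFiltA n := by
  apply PySem.List.sorted_eq_of_perm_of_pairwise_lt
  · rw [List.perm_ext_iff_of_nodup ((pvFiltA_pairwise n).imp ne_of_lt)
      (pvBFacs_nodup n 2 le_rfl)]
    intro x
    rw [pvFiltA_mem, pvBFacs_mem n 2 le_rfl]
    constructor
    · rintro ⟨hdvd, h2x, h2xn⟩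
      refine ⟨hdvd, ?_⟩
      by_cases hxx : x * x ≤ n
      · exact Or.inl ⟨h2x, hxx⟩
      · exact Or.inr ⟨by omega, by omega, h2xn⟩
    · rintro ⟨hdvd, ⟨h2x, hxx⟩ | ⟨hx1, hnx, h2xn⟩⟩
      · exact ⟨hdvd, h2x, by nlinarith⟩
      · refine ⟨hdvd, ?_, h2xn⟩
        by_contra hc
        have hx1' : x = 1 := by omega
        subst hx1'
        norm_num at hnx
        omega
  · exact pvFiltA_pairwise n

-- ===== VERDICT (by name: the statement is the Claim_ definition above) =====
theorem productOfProperFactors_spec : Claim_equal_productOfProperFactors := by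
  intro n _
  unfold Spec_productOfProperFactors productOfProperFactors productOfProperFactors_alt
  rw [pvKeyList, pvFoldA]
  have hF : (PySem.List.pyRange 2 (PySem.Int.floordiv n 2 + 1) 1).filter
      (fun d => decide (PySem.Int.mod n d = 0)) = pvFiltA n := rfl
  rw [hF, ← String.toList_inj]
  have hstar : ("*" : String).toList = ['*'] := rfl
  simp only [String.toList_append, PySem.Str.toList_join, PySem.Int.toList_toStr,
    PySem.Str.slice_to_neg_one, List.map_map, Function.comp_def, String.toList_ofList,
    String.toList_empty, List.nil_append, one_mul, hstar]
  rw [pvDropLastStars _ (by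
    intro c hc
    simp only [List.mem_map] at hc
    obtain ⟨d, _, rfl⟩ := hc
    exact pvToCharsNeNil d)]
  rw [show ((pvFiltA n).foldl (fun a f => a * f) 1) = (pvFiltA n).prod from
    (List.prod_eq_foldl).symm]
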